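-- pv_equiv track=rewrite | github.com/Red-0111/DSA-GeeksClasses | Graphs/printPattern.py | pattern
-- ===== SOURCE A (Python) =====
-- def pattern(N):
--     # code here
--     result = []
--     x = N
--     while (x > 0):
--         result.append(x)
--         x -= 5
--     while (x <= N):
--         result.append(x)
--         x += 5
--     return result
-- ===== SOURCE B (Python) =====
-- def pattern(N):
--     descent = []
--     x = N
--     while x > 0:
--         descent.append(x)
--         x -= 5
--     return descent + [x] + descent[::-1]
-- ===== Notes on version B (the rewrite author's own statement) =====
-- stated objective: simpler
-- what changed: B runs only the descending loop and reconstructs the ascending half by mirroring the descent (descent + [bottom] + reversed descent) instead of a second arithmetic while-loop.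
import Mathlib
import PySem

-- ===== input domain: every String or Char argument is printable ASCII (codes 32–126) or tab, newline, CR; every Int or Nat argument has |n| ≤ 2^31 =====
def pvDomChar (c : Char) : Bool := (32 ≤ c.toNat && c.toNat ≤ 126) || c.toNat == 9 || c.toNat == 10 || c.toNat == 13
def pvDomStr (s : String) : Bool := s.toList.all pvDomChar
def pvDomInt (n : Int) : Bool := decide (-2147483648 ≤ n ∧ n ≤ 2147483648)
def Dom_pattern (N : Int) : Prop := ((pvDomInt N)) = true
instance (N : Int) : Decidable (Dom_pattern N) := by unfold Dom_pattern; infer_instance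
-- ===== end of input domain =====

-- B builds only the descending half and mirrors it around the bottom value instead of
-- running A's second ascending while-loop (objective: simpler).

-- ===== PORT A =====
-- first while-loop: append x while x > 0, x -= 5; returns (result, x)
def patternGo1 (x : Int) (result : List Int) : List Int × Int :=
  if x > 0 then patternGo1 (x - 5) (result ++ [x]) else (result, x)
termination_by x.toNat
decreasing_by omega

-- second while-loop: append x while x ≤ N, x += 5
def patternGo2 (N x : Int) (result : List Int) : List Int :=
  if x ≤ N then patternGo2 N (x + 5) (result ++ [x]) else result
termination_by (N - x + 5).toNat
decreasing_by omega

def pattern (N : Int) : List Int :=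
  let p := patternGo1 N []
  patternGo2 N p.2 p.1

-- ===== PORT B =====
-- the single while-loop of B: returns (descent, final x)
def patternDown (x : Int) : List Int × Int :=
  if x > 0 then
    let p := patternDown (x - 5)
    (x :: p.1, p.2)
  else ([], x)
termination_by x.toNat
decreasing_by omega

def pattern_alt (N : Int) : List Int :=
  let p := patternDown N
  p.1 ++ p.2 :: p.1.reverse

-- ===== PRECONDITION & SPEC =====
def Spec_pattern (N : Int) (out : List Int) : Prop := out = pattern_alt N
instance (N : Int) (out : List Int) : Decidable (Spec_pattern N out) := by unfold Spec_pattern; infer_instance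

-- ===== CLAIM (what is proved, stated in full; the proofs are below) =====
def Claim_equal_pattern : Prop := ∀ (N : Int), Dom_pattern N → Spec_pattern N (pattern N)

-- ===== LEMMAS AND PROOFS =====

-- the ascending list produced by A's second loop, without the accumulator
def patternUp (b x : Int) : List Int :=
  if b ≤ x then b :: patternUp (b + 5) x else []
termination_by (x - b + 5).toNat
decreasing_by omega


theorem patternUp_nil (b x : Int) (h : x < b) : patternUp b x = [] := by
  rw [patternUp, if_neg (by omega)]

theorem patternGo1_eq (x : Int) (acc : List Int) :
    patternGo1 x acc = (acc ++ (patternDown x).1, (patternDown x).2) := by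
  fun_induction patternDown x generalizing acc with
  | case1 x hx p ih =>
    rw [patternGo1]
    simp only [hx, if_pos]
    rw [ih]
    simp only [List.append_assoc, List.singleton_append, Prod.mk.injEq]
    exact ⟨rfl, rfl⟩
  | case2 x hx =>
    rw [patternGo1]
    simp [hx]

theorem patternGo2_eq (N x : Int) (acc : List Int) :
    patternGo2 N x acc = acc ++ patternUp x N := by
  fun_induction patternUp x N generalizing acc with
  | case1 b hb ih =>
    rw [patternGo2]
    simp only [hb, if_pos]
    rw [ih]
    simp
  | case2 b hb =>
    rw [patternGo2]
    simp [hb]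

theorem patternDown_snd_le (x : Int) : (patternDown x).2 ≤ x := by
  fun_induction patternDown x with
  | case1 x hx p ih =>
    show (patternDown (x - 5)).2 ≤ x
    omega
  | case2 x hx => simp

theorem patternDown_dvd (x : Int) : (5 : Int) ∣ (x - (patternDown x).2) := by
  fun_induction patternDown x with
  | case1 x hx p ih =>
    show (5 : Int) ∣ (x - (patternDown (x - 5)).2)
    omega
  | case2 x hx => simp

theorem patternUp_snoc (b x : Int) :
    b ≤ x → (5 : Int) ∣ (x - b) → patternUp b x = patternUp b (x - 5) ++ [x] := by
  fun_induction patternUp b x with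
  | case1 b hb ih =>
    intro _ hdvd
    by_cases hbx : b = x
    · subst hbx
      rw [patternUp_nil (b + 5) b (by omega), patternUp_nil b (b - 5) (by omega)]
      simp
    · have h5 : b + 5 ≤ x := by omega
      rw [ih h5 (by omega)]
      conv_rhs => rw [patternUp, if_pos (show b ≤ x - 5 by omega)]
      simp
  | case2 b hb => intro h1 _; omega

theorem patternUp_eq (x : Int) :
    patternUp (patternDown x).2 x = (patternDown x).2 :: (patternDown x).1.reverse := by
  fun_induction patternDown x with
  | case1 x hx p ih =>
    have hle : (patternDown (x - 5)).2 ≤ x - 5 := patternDown_snd_le (x - 5)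
    have hdvd : (5 : Int) ∣ (x - 5 - (patternDown (x - 5)).2) := patternDown_dvd (x - 5)
    show patternUp (patternDown (x - 5)).2 x
        = (patternDown (x - 5)).2 :: (x :: (patternDown (x - 5)).1).reverse
    rw [patternUp_snoc _ _ (by omega) (by omega)]
    rw [ih]
    simp
  | case2 x hx =>
    show patternUp x x = x :: List.reverse []
    rw [patternUp, if_pos le_rfl, patternUp_nil (x + 5) x (by omega)]
    simp

-- ===== VERDICT (by name: the statement is the Claim_ definition above) =====
theorem pattern_spec : Claim_equal_pattern := by
  intro N _
  unfold Spec_pattern pattern pattern_alt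
  simp only
  rw [patternGo1_eq, patternGo2_eq]
  simp [patternUp_eq]
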